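-- pv_equiv track=rewrite | github.com/steve-sanogo/RxPersonna | preprocessor.py | fix_character
-- ===== SOURCE A (Python) =====
-- def fix_character(corpus, character):
--     """
--     La segmentation en phrase avec Spacy rencontre plusieurs problèmes avec les caractères définis ci-dessous.
--     Cette fonction permet de corriger cela.
--     """
--     new_corpus = []
--     valeurs_valides = ["...", "?", ";", "!", ","]
--
--     if character not in valeurs_valides:
--         raise ValueError(f"Valeur invalide : {character}. Les valeurs possibles sont : {valeurs_valides}")
--
--     i = 0
--     while i < len(corpus):
--         line = corpus[i]
--
--         if line.endswith(str(character)):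
--             # Trouver les phrases suivantes qui commencent par une minuscule
--             cpt = i + 1
--             while cpt < len(corpus) and corpus[cpt] and corpus[cpt][0].islower():
--                 cpt += 1
--
--             # Fusionner les phrases de i à cpt-1
--             merged_phrase = " ".join(corpus[i:cpt])
--             new_corpus.append(merged_phrase)
--             i = cpt  # Avancer jusqu'à la position cpt
--         else:
--             new_corpus.append(corpus[i])
--             i += 1  # Avancer d'une position
--
--     return new_corpus
-- ===== SOURCE B (Python) =====
-- def fix_character(corpus, character):
--     """Single forward pass with an 'absorbing' flag instead of lookahead/index jumps."""
--     valeurs_valides = ["...", "?", ";", "!", ","]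
--     if character not in valeurs_valides:
--         raise ValueError(f"Valeur invalide : {character}. Les valeurs possibles sont : {valeurs_valides}")
--
--     result = []
--     absorbing = False
--     for line in corpus:
--         if absorbing and line and line[0].islower():
--             result[-1] += " " + line
--         else:
--             result.append(line)
--             absorbing = line.endswith(character)
--     return result
-- ===== Notes on version B (the rewrite author's own statement) =====
-- stated objective: simpler
-- what changed: Replaced the index-jumping while-loop with an inner lookahead scan, slice and join by a single flat forward pass that carries an 'absorbing' boolean and concatenates a merging line directly onto the last result element.
import Mathlib
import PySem

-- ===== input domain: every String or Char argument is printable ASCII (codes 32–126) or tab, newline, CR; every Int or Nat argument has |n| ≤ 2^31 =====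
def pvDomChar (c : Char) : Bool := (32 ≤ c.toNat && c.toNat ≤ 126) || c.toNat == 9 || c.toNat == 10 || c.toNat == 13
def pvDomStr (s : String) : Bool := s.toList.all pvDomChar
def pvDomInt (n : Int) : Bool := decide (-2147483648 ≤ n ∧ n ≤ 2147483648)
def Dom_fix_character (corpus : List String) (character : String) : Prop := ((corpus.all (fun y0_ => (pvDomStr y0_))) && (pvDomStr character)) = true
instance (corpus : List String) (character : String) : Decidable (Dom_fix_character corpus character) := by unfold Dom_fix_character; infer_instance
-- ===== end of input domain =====

-- B replaces A's index-jumping lookahead/slice/join structure by one flat forward pass with an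
-- 'absorbing' flag that concatenates merging lines onto the last result element (objective: simpler).

-- ===== PORT A =====
-- `corpus[cpt] and corpus[cpt][0].islower()` for one line (truthiness + first-char islower)
def pvLowA (l : String) : Bool :=
  match l.toList with
  | [] => false
  | c :: _ => PySem.Chars.islower c

-- A's inner `while cpt < len(corpus) and …: cpt += 1` together with the slice `corpus[i+1:cpt]`:
-- returns (the scanned lowercase-starting lines, the remaining suffix from position cpt).
def pvInnerA : List String → List String × List String
  | [] => ([], [])
  | l :: ls =>
    if pvLowA l then
      let p := pvInnerA ls
      (l :: p.1, p.2)
    else ([], l :: ls)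

lemma pvInnerA_len : ∀ ls : List String, (pvInnerA ls).2.length ≤ ls.length := by
  intro ls
  induction ls with
  | nil => simp [pvInnerA]
  | cons l ls ih =>
    by_cases h : pvLowA l <;> simp [pvInnerA, h] <;> omega

-- A's outer `while i < len(corpus)` loop, with the suffix from position i as the state.
def pvLoopA (character : String) : List String → List String
  | [] => []
  | line :: rest =>
    if PySem.Str.endswith line character then
      PySem.Str.join " " (line :: (pvInnerA rest).1) :: pvLoopA character (pvInnerA rest).2
    else
      line :: pvLoopA character rest
termination_by ls => ls.length
decreasing_by
  · have := pvInnerA_len rest; simp; omega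
  · simp

def fix_character (corpus : List String) (character : String) : List String :=
  if character ∈ ["...", "?", ";", "!", ","] then
    pvLoopA character corpus
  else []  -- Python raises ValueError here; excluded by Pre_fix_character

-- ===== PORT B =====
def pvLowB (l : String) : Bool :=
  match l.toList with
  | [] => false
  | c :: _ => PySem.Chars.islower c

-- `result[-1] += s` (result is nonempty whenever B reaches this statement)
def pvAppendLast : List String → String → List String
  | [], _ => []
  | [x], s => [x ++ s]
  | x :: y :: rest, s => x :: pvAppendLast (y :: rest) s

def pvLoopB (character : String) : List String → List String → Bool → List String
  | [], result, _ => result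
  | line :: rest, result, absorbing =>
    if absorbing && pvLowB line then
      pvLoopB character rest (pvAppendLast result (" " ++ line)) absorbing
    else
      pvLoopB character rest (result ++ [line]) (PySem.Str.endswith line character)

def fix_character_alt (corpus : List String) (character : String) : List String :=
  if character ∈ ["...", "?", ";", "!", ","] then
    pvLoopB character corpus [] false
  else []  -- Python raises ValueError here; excluded by Pre_fix_character

-- ===== PRECONDITION & SPEC =====
-- Pre_ excludes exactly the inputs where A raises ValueError (character not among the five valid
-- separators); B raises the same ValueError there.
def Pre_fix_character (corpus : List String) (character : String) : Prop :=
  character ∈ ["...", "?", ";", "!", ","]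
instance (corpus : List String) (character : String) : Decidable (Pre_fix_character corpus character) := by
  unfold Pre_fix_character; infer_instance

def pvWitness_fix_character : List String × String := (["Bonjour,", "le monde.", "Fin"], ",")

def Spec_fix_character (corpus : List String) (character : String) (out : List String) : Prop := out = fix_character_alt corpus character
instance (corpus : List String) (character : String) (out : List String) : Decidable (Spec_fix_character corpus character out) := by unfold Spec_fix_character; infer_instance

-- ===== CLAIM (what is proved, stated in full; the proofs are below) =====
def Claim_equal_fix_character : Prop := ∀ (corpus : List String) (character : String), Dom_fix_character corpus character → Pre_fix_character corpus character → Spec_fix_character corpus character (fix_character corpus character)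

-- ===== LEMMAS AND PROOFS =====

lemma pvAppendLast_append (acc : List String) (l s : String) :
    pvAppendLast (acc ++ [l]) s = acc ++ [l ++ s] := by
  induction acc with
  | nil => rfl
  | cons x xs ih =>
    cases xs with
    | nil => simp [pvAppendLast]
    | cons y t => simpa [pvAppendLast] using ih

lemma pvSjoin_single (l : String) : PySem.Str.join " " [l] = l := by
  rw [← String.toList_inj, PySem.Str.toList_join]
  simp [PySem.Chars.join_singleton]

lemma pvSjoin_merge (a b : String) (xs : List String) :
    PySem.Str.join " " ((a ++ " " ++ b) :: xs) = PySem.Str.join " " (a :: b :: xs) := by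
  cases xs with
  | nil =>
    rw [← String.toList_inj, PySem.Str.toList_join, PySem.Str.toList_join]
    simp only [List.map_cons, List.map_nil, String.toList_append]
    rw [PySem.Chars.join_singleton, PySem.Chars.join_cons_cons, PySem.Chars.join_singleton]
  | cons x t =>
    rw [← String.toList_inj, PySem.Str.toList_join, PySem.Str.toList_join]
    simp only [List.map_cons, String.toList_append]
    rw [PySem.Chars.join_cons_cons, PySem.Chars.join_cons_cons, PySem.Chars.join_cons_cons]
    simp

lemma pvMain (ch : String) : ∀ (n : Nat) (ls : List String), ls.length ≤ n →
    (∀ acc, pvLoopB ch ls acc false = acc ++ pvLoopA ch ls) ∧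
    (∀ acc l, pvLoopB ch ls (acc ++ [l]) true =
      acc ++ PySem.Str.join " " (l :: (pvInnerA ls).1) :: pvLoopA ch (pvInnerA ls).2) := by
  intro n
  induction n with
  | zero =>
    intro ls h
    have : ls = [] := List.length_eq_zero_iff.mp (Nat.le_zero.mp h)
    subst this
    exact ⟨fun acc => by simp [pvLoopB, pvLoopA],
      fun acc l => by simp [pvLoopB, pvLoopA, pvInnerA, pvSjoin_single]⟩
  | succ n ih =>
    intro ls h
    cases ls with
    | nil =>
      exact ⟨fun acc => by simp [pvLoopB, pvLoopA],
        fun acc l => by simp [pvLoopB, pvLoopA, pvInnerA, pvSjoin_single]⟩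
    | cons r rs =>
      have hlen : rs.length ≤ n := by simpa using h
      constructor
      · intro acc
        show (if (false && pvLowB r) = true then
                pvLoopB ch rs (pvAppendLast acc (" " ++ r)) false
              else pvLoopB ch rs (acc ++ [r]) (PySem.Str.endswith r ch))
             = acc ++ pvLoopA ch (r :: rs)
        rw [if_neg (by simp)]
        by_cases he : PySem.Str.endswith r ch = true
        · rw [he, (ih rs hlen).2 acc r, pvLoopA, if_pos he]
        · have he' : PySem.Str.endswith r ch = false := eq_false_of_ne_true he
          rw [he', (ih rs hlen).1 (acc ++ [r]), pvLoopA, if_neg he]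
          simp
      · intro acc l
        show (if (true && pvLowB r) = true then
                pvLoopB ch rs (pvAppendLast (acc ++ [l]) (" " ++ r)) true
              else pvLoopB ch rs (acc ++ [l] ++ [r]) (PySem.Str.endswith r ch))
             = acc ++ PySem.Str.join " " (l :: (pvInnerA (r :: rs)).1) ::
                 pvLoopA ch (pvInnerA (r :: rs)).2
        by_cases hm : pvLowB r = true
        · rw [if_pos (by simp [hm]), pvAppendLast_append, (ih rs hlen).2 acc (l ++ (" " ++ r))]
          have hassoc : l ++ (" " ++ r) = l ++ " " ++ r := by rw [String.append_assoc]
          rw [hassoc, pvSjoin_merge]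
          have hmA : pvLowA r = true := hm
          have h1 : (pvInnerA (r :: rs)).1 = r :: (pvInnerA rs).1 := by simp [pvInnerA, hmA]
          have h2 : (pvInnerA (r :: rs)).2 = (pvInnerA rs).2 := by simp [pvInnerA, hmA]
          rw [h1, h2]
        · have hm' : pvLowB r = false := eq_false_of_ne_true hm
          have hmA : pvLowA r = false := hm'
          have h1 : (pvInnerA (r :: rs)).1 = [] := by simp [pvInnerA, hmA]
          have h2 : (pvInnerA (r :: rs)).2 = r :: rs := by simp [pvInnerA, hmA]
          rw [if_neg (by simp [hm']), h1, h2, pvSjoin_single]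
          by_cases he : PySem.Str.endswith r ch = true
          · rw [he, (ih rs hlen).2 (acc ++ [l]) r, pvLoopA, if_pos he]
            simp
          · have he' : PySem.Str.endswith r ch = false := eq_false_of_ne_true he
            rw [he', (ih rs hlen).1 (acc ++ [l] ++ [r]), pvLoopA, if_neg he]
            simp

-- ===== VERDICT (by name: the statement is the Claim_ definition above) =====
theorem fix_character_spec : Claim_equal_fix_character := by
  intro corpus character _ hpre
  unfold Spec_fix_character fix_character fix_character_alt
  have hmem : character ∈ ["...", "?", ";", "!", ","] := hpre
  rw [if_pos hmem, if_pos hmem]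
  have := (pvMain character corpus.length corpus le_rfl).1 []
  simpa using this.symm
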